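-- pv_equiv track=rewrite | github.com/mserdukoff/grammario-monorepo | backend/app/services/strategies/concrete.py | _find_stem
-- ===== SOURCE A (Python) =====
-- from typing import List, Any, Dict, Optional
--
-- def _find_stem(word: str, lemma: str) -> Optional[str]:
--     """Find the actual stem in a word, accounting for Turkish phonological changes."""
--     # Consonant softening: k->ğ, p->b, t->d, ç->c
--     softening = {'k': 'ğ', 'p': 'b', 't': 'd', 'ç': 'c'}
--
--     # Try direct match first
--     for i in range(len(lemma), 0, -1):
--         if word.startswith(lemma[:i]):
--             return lemma[:i]
--
--     # Try with consonant softening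
--     if lemma and lemma[-1] in softening:
--         modified_lemma = lemma[:-1] + softening[lemma[-1]]
--         for i in range(len(modified_lemma), 0, -1):
--             if word.startswith(modified_lemma[:i]):
--                 return modified_lemma[:i]
--
--     return None
-- ===== SOURCE B (Python) =====
-- from typing import Optional
--
-- def _common_prefix_len(w: str, s: str) -> int:
--     n = 0
--     for a, b in zip(w, s):
--         if a != b:
--             break
--         n += 1
--     return n
--
-- def _find_stem(word: str, lemma: str) -> Optional[str]:
--     """Single left-to-right common-prefix scan instead of repeated startswith checks."""
--     softening = {'k': 'ğ', 'p': 'b', 't': 'd', 'ç': 'c'}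
--     n = _common_prefix_len(word, lemma)
--     if n:
--         return lemma[:n]
--     if lemma and lemma[-1] in softening:
--         modified = lemma[:-1] + softening[lemma[-1]]
--         n = _common_prefix_len(word, modified)
--         if n:
--             return modified[:n]
--     return None
-- ===== Notes on version B (the rewrite author's own statement) =====
-- stated objective: faster
-- what changed: Replaces the descending loop of startswith checks over every lemma prefix with a single left-to-right common-prefix-length scan (done once for the lemma and once for the softened lemma).
import Mathlib
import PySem

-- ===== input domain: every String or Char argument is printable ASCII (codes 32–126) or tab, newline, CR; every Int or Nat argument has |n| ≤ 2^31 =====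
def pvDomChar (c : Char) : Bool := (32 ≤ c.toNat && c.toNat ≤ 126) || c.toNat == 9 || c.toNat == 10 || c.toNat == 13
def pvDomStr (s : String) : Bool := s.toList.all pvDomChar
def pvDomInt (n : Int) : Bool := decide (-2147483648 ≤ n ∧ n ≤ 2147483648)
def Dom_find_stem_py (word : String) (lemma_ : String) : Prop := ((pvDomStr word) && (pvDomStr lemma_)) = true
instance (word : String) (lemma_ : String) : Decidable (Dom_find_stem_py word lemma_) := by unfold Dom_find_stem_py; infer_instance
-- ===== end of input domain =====

-- B replaces A's O(n^2) descending loop of startswith checks by a single O(n) common-prefix scan.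

-- the literal dict {'k':'ğ','p':'b','t':'d','ç':'c'} as a lookup (shared constant table)
def pvSoften? (c : Char) : Option Char :=
  if c = 'k' then some 'ğ'
  else if c = 'p' then some 'b'
  else if c = 't' then some 'd'
  else if c = 'ç' then some 'c'
  else none

-- ===== PORT A =====
-- 'for i in range(k, 0, -1): if word.startswith(lemma[:i]): return lemma[:i]' (lemma[:i] = take i for 0 ≤ i)
def pvAStartsLoop (w l : List Char) : Nat → Option (List Char)
  | 0 => none
  | i + 1 =>
    if PySem.Chars.startswith w (l.take (i + 1)) then some (l.take (i + 1))
    else pvAStartsLoop w l i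

def find_stem_py (word : String) (lemma_ : String) : Option String :=
  let w := word.toList
  let l := lemma_.toList
  match pvAStartsLoop w l l.length with
  | some s => some (String.ofList s)
  | none =>
    match l.getLast? with          -- 'if lemma and lemma[-1] in softening'
    | none => none
    | some c =>
      match pvSoften? c with
      | none => none
      | some sc =>
        let ml := l.dropLast ++ [sc]   -- lemma[:-1] + softening[lemma[-1]]
        (pvAStartsLoop w ml ml.length).map String.ofList

-- ===== PORT B =====
-- single-pass common prefix length (the zip loop of Source B)
def pvCpl : List Char → List Char → Nat
  | a :: as, b :: bs => if a = b then pvCpl as bs + 1 else 0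
  | _, _ => 0

def find_stem_py_alt (word : String) (lemma_ : String) : Option String :=
  let w := word.toList
  let l := lemma_.toList
  let n := pvCpl w l
  if n ≠ 0 then some (String.ofList (l.take n))
  else
    match l.getLast? with
    | none => none
    | some c =>
      match pvSoften? c with
      | none => none
      | some sc =>
        let ml := l.dropLast ++ [sc]
        let m := pvCpl w ml
        if m ≠ 0 then some (String.ofList (ml.take m)) else none

-- ===== PRECONDITION & SPEC =====
def Spec_find_stem_py (word : String) (lemma_ : String) (out : Option String) : Prop := out = find_stem_py_alt word lemma_
instance (word : String) (lemma_ : String) (out : Option String) : Decidable (Spec_find_stem_py word lemma_ out) := by unfold Spec_find_stem_py; infer_instance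

-- ===== CLAIM (what is proved, stated in full; the proofs are below) =====
def Claim_equal_find_stem_py : Prop := ∀ (word : String) (lemma_ : String), Dom_find_stem_py word lemma_ → Spec_find_stem_py word lemma_ (find_stem_py word lemma_)

-- ===== LEMMAS AND PROOFS =====

theorem pvCpl_le (w l : List Char) : pvCpl w l ≤ l.length := by
  induction l generalizing w with
  | nil => cases w <;> simp [pvCpl]
  | cons b bs ih =>
    cases w with
    | nil => simp [pvCpl]
    | cons a as =>
      simp only [pvCpl]
      split
      · simpa using ih as
      · simp

theorem take_prefix_iff (w l : List Char) (i : Nat) (hi : i ≤ l.length) :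
    (l.take i <+: w) ↔ i ≤ pvCpl w l := by
  induction l generalizing w i with
  | nil =>
    have : i = 0 := by simpa using hi
    subst this
    cases w <;> simp [pvCpl]
  | cons b bs ih =>
    cases i with
    | zero => simp
    | succ j =>
      cases w with
      | nil =>
        simp [pvCpl]
      | cons a as =>
        simp only [List.take_succ_cons, List.cons_prefix_cons, pvCpl]
        by_cases hab : a = b
        · subst hab
          rw [if_pos rfl, ih as j (by simpa using hi)]
          constructor
          · rintro ⟨-, h⟩; omega
          · intro h; exact ⟨rfl, by omega⟩
        · rw [if_neg hab]
          constructor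
          · rintro ⟨h, -⟩; exact absurd h.symm hab
          · omega

theorem loop_eq (w l : List Char) : ∀ (k : Nat), k ≤ l.length →
    pvAStartsLoop w l k =
      if min k (pvCpl w l) ≠ 0 then some (l.take (min k (pvCpl w l))) else none
  | 0, _ => by simp [pvAStartsLoop]
  | j + 1, hk => by
    rw [pvAStartsLoop]
    by_cases h : j + 1 ≤ pvCpl w l
    · rw [if_pos (by rw [PySem.Chars.startswith_iff, take_prefix_iff w l _ hk]; exact h)]
      have hm : min (j + 1) (pvCpl w l) = j + 1 := by omega
      rw [if_pos (by omega), hm]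
    · rw [if_neg (by rw [PySem.Chars.startswith_iff, take_prefix_iff w l _ hk]; exact h)]
      rw [loop_eq w l j (by omega)]
      have hm : min j (pvCpl w l) = min (j + 1) (pvCpl w l) := by omega
      rw [hm]

theorem loop_full (w l : List Char) :
    pvAStartsLoop w l l.length =
      if pvCpl w l ≠ 0 then some (l.take (pvCpl w l)) else none := by
  rw [loop_eq w l l.length le_rfl]
  have : min l.length (pvCpl w l) = pvCpl w l := by
    have := pvCpl_le w l; omega
  rw [this]

-- ===== VERDICT (by name: the statement is the Claim_ definition above) =====
theorem find_stem_py_spec : Claim_equal_find_stem_py := by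
  intro word lemma_ _
  show find_stem_py word lemma_ = find_stem_py_alt word lemma_
  unfold find_stem_py find_stem_py_alt
  simp only [loop_full]
  by_cases h : pvCpl word.toList lemma_.toList ≠ 0
  · simp [h]
  · simp only [if_neg h]
    cases lemma_.toList.getLast? with
    | none => rfl
    | some c =>
      cases hs : pvSoften? c with
      | none => simp [hs]
      | some sc =>
        simp only [hs]
        by_cases h2 : pvCpl word.toList (lemma_.toList.dropLast ++ [sc]) ≠ 0
        · simp [h2]
        · simp at h2
          simp [h2]
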